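-- pv_equiv track=rewrite | github.com/wicked43/Scratch | best_travel.py | recurse
-- ===== SOURCE A (Python) =====
-- def recurse(sum, ls, level):
--   if level == 1:
--     return [(x+sum) for x in ls]
--   ary = list(ls)
--   totals = []
--   for x in ls:
--     ary.remove(x)
--     if len(ary) >= level - 1:
--       totals += recurse(sum+x, ary, level - 1)
--   return totals
-- ===== SOURCE B (Python) =====
-- def recurse(sum, ls, level):
--     # Index-based combination enumeration with a running sum: no list copies, no remove().
--     if level <= 0:
--         return []
--     n = len(ls)
--     out = []
--     def go(start, k, acc):
--         if k == 1:
--             for j in range(start, n):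
--                 out.append(acc + ls[j])
--         else:
--             for j in range(start, n - k + 1):
--                 go(j + 1, k - 1, acc + ls[j])
--     go(0, level, sum)
--     return out
-- ===== Notes on version B (the rewrite author's own statement) =====
-- stated objective: alternative
-- what changed: Replaces A's per-step list copy and ary.remove() with an index-based combination recursion that threads a running sum; it trades A's list surgery for index arithmetic but the cost stays dominated by the C(n,level)-sized output.
import Mathlib
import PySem

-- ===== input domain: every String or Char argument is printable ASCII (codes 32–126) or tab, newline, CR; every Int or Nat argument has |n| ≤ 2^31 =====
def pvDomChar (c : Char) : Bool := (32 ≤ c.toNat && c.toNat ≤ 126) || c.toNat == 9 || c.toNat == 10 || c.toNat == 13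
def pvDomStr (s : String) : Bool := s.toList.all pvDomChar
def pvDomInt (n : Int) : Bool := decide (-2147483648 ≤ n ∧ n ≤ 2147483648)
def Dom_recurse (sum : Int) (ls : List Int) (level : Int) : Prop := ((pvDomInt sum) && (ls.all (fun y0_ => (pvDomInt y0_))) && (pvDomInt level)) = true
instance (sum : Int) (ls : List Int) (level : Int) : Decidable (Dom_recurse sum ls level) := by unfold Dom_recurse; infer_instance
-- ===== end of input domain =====

-- B replaces A's per-step list copy + ary.remove() with an index-based combination
-- recursion threading a running sum (objective: alternative algorithm, same cost).


-- ===== PORT A =====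
-- termination helper for the port: a successful ary.remove(x) shortens ary by one
theorem pv_remove_length {ary r : List Int} {v : Int}
    (h : PySem.List.remove? ary v = some r) : r.length + 1 = ary.length := by
  have hv : v ∈ ary := by
    by_contra hm
    rw [(PySem.List.remove?_eq_none_iff ary v).mpr hm] at h
    cases h
  rw [PySem.List.remove?_eq_some_erase ary v hv] at h
  cases h
  have hpos : 0 < ary.length := List.length_pos_of_mem hv
  rw [List.length_erase_of_mem hv]
  omega

mutual
-- the 'for x in ls' loop of A, with the mutated copy 'ary' and accumulator 'totals' explicit
def recurseLoop (sum level : Int) (xs ary totals : List Int) : List Int :=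
  match xs with
  | [] => totals
  | x :: rest =>
    match h : PySem.List.remove? ary x with
    | none => totals  -- unreachable from recurse: x is always in ary there (Python never raises)
    | some ary' =>
      if level - 1 ≤ (ary'.length : Int) then
        recurseLoop sum level rest ary' (totals ++ recurse (sum + x) ary' (level - 1))
      else
        recurseLoop sum level rest ary' totals
termination_by 2 * ary.length
decreasing_by all_goals (have := pv_remove_length h; omega)

def recurse (sum : Int) (ls : List Int) (level : Int) : List Int :=
  if level = 1 then ls.map (fun x => x + sum)
  else recurseLoop sum level ls ls []
termination_by 2 * ls.length + 1
decreasing_by omega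
end

-- ===== PORT B =====
-- Source B's inner 'go(start, k, acc)' (k = remaining level, always ≥ 1 as reached from recurse_alt)
def altGo (ls : List Int) (n : Nat) (k : Nat) (start : Nat) (acc : Int) : List Int :=
  if k = 1 then
    (List.range' start (n - start)).map (fun j => acc + ls.getD j 0)
  else
    match k with
    | 0 => []  -- unreachable from recurse_alt (guarded by level ≤ 0)
    | k' + 1 =>
      ((List.range' start (n - k' - start)).map
        (fun j => altGo ls n k' (j + 1) (acc + ls.getD j 0))).flatten

def recurse_alt (sum : Int) (ls : List Int) (level : Int) : List Int :=
  if level ≤ 0 then []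
  else altGo ls ls.length level.toNat 0 sum

-- ===== PRECONDITION & SPEC =====
def Spec_recurse (sum : Int) (ls : List Int) (level : Int) (out : List Int) : Prop := out = recurse_alt sum ls level
instance (sum : Int) (ls : List Int) (level : Int) (out : List Int) : Decidable (Spec_recurse sum ls level out) := by unfold Spec_recurse; infer_instance

-- ===== CLAIM (what is proved, stated in full; the proofs are below) =====
def Claim_equal_recurse : Prop := ∀ (sum : Int) (ls : List Int) (level : Int), Dom_recurse sum ls level → Spec_recurse sum ls level (recurse sum ls level)

-- ===== LEMMAS AND PROOFS =====

-- reference function: sums of `sum` plus each size-k combination, in index-lexicographic order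
def R (sum : Int) (ls : List Int) (k : Nat) : List Int :=
  match k, ls with
  | 0, _ => []
  | 1, ls => ls.map (fun x => x + sum)
  | _ + 2, [] => []
  | k + 2, x :: xs =>
      (if k + 1 ≤ xs.length then R (sum + x) xs (k + 1) else []) ++ R sum xs (k + 2)

lemma R_nil (acc : Int) (k : Nat) : R acc [] k = [] := by
  match k with
  | 0 => rfl
  | 1 => rfl
  | _ + 2 => rfl

lemma R_short : ∀ (xs : List Int) (k : Nat) (acc : Int), xs.length < k → R acc xs k = [] := by
  intro xs
  induction xs with
  | nil => intro k acc _; exact R_nil acc k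
  | cons x xs ih =>
    intro k acc h
    match k with
    | 0 => rfl
    | 1 => simp at h
    | k + 2 =>
      simp only [R]
      have h1 : ¬ (k + 1 ≤ xs.length) := by simp at h; omega
      rw [if_neg h1, ih (k + 2) acc (by simp at h ⊢; omega)]
      rfl

lemma recurseLoop_eq (N : Nat)
    (ihN : ∀ ls' : List Int, ls'.length ≤ N → ∀ (s l : Int),
      recurse s ls' l = if 1 ≤ l then R s ls' l.toNat else [])
    (sum level : Int) (h1 : level ≠ 1) :
    ∀ (xs totals : List Int), xs.length ≤ N + 1 →
      recurseLoop sum level xs xs totals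
        = totals ++ (if 1 ≤ level then R sum xs level.toNat else []) := by
  intro xs
  induction xs with
  | nil =>
    intro totals _
    rw [recurseLoop]
    simp [R_nil]
  | cons x rest ihr =>
    intro totals hx
    have hrest : rest.length ≤ N := by simp at hx; omega
    rw [recurseLoop]
    split
    case _ h => rw [PySem.List.remove?_cons_self] at h; cases h
    case _ ary' h =>
    rw [PySem.List.remove?_cons_self] at h
    injection h with h'
    subst h'
    by_cases hlev : 1 ≤ level
    · have hlev2 : 2 ≤ level := by omega
      obtain ⟨k, hk⟩ : ∃ k, level.toNat = k + 2 := ⟨level.toNat - 2, by omega⟩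
      have hlv : level = (k : Int) + 2 := by omega
      have hrec : recurse (sum + x) rest (level - 1) = R (sum + x) rest (k + 1) := by
        rw [ihN rest hrest (sum + x) (level - 1), if_pos (by omega)]
        congr 1
        omega
      by_cases hg : level - 1 ≤ (rest.length : Int)
      · rw [if_pos hg, ihr _ (Nat.le_succ_of_le hrest), if_pos hlev, hk]
        simp only [R]
        rw [if_pos (show k + 1 ≤ rest.length by omega), hrec, List.append_assoc, if_pos hlev]
      · rw [if_neg hg, ihr _ (Nat.le_succ_of_le hrest), if_pos hlev, hk]
        simp only [R]
        rw [if_neg (show ¬ (k + 1 ≤ rest.length) by omega)]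
        simp
        intro hcon
        omega
    · have hg : level - 1 ≤ (rest.length : Int) := by
        have : (0 : Int) ≤ rest.length := Int.natCast_nonneg _
        omega
      rw [if_pos hg, ihN rest hrest (sum + x) (level - 1), if_neg (by omega),
        ihr _ (Nat.le_succ_of_le hrest), if_neg hlev, if_neg hlev]
      simp

lemma recurse_eq_R (N : Nat) : ∀ ls : List Int, ls.length ≤ N → ∀ (sum level : Int),
    recurse sum ls level = if 1 ≤ level then R sum ls level.toNat else [] := by
  induction N with
  | zero =>
    intro ls h sum level
    have hnil : ls = [] := List.eq_nil_of_length_eq_zero (Nat.le_zero.mp h)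
    subst hnil
    by_cases h1 : level = 1
    · subst h1
      rw [recurse]
      simp [R_nil]
    · rw [recurse, if_neg h1, recurseLoop]
      simp [R_nil]
  | succ N ih =>
    intro ls hlen sum level
    by_cases h1 : level = 1
    · subst h1
      rw [recurse]
      simp only [if_pos (by omega : (1:Int) ≤ 1)]
      show ls.map (fun x => x + sum) = R sum ls (1 : Int).toNat
      match ls with
      | [] => rfl
      | x :: xs => rfl
    · rw [recurse, if_neg h1, recurseLoop_eq N ih sum level h1 ls [] hlen]
      simp

lemma getD_in_range (ls : List Int) (j : Nat) (h : j < ls.length) : ls.getD j 0 = ls[j] := by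
  rw [List.getD_eq_getElem?_getD, List.getElem?_eq_getElem h]
  rfl

lemma range'_map_getD (ls : List Int) (start : Nat) (acc : Int) :
    (List.range' start (ls.length - start)).map (fun j => acc + ls.getD j 0)
      = R acc (ls.drop start) 1 := by
  have hR : R acc (ls.drop start) 1 = (ls.drop start).map (fun x => x + acc) := by
    match h : ls.drop start with
    | [] => rfl
    | x :: xs => rfl
  rw [hR]
  apply List.ext_getElem
  · simp
  · intro i h1 h2
    simp only [List.getElem_map, List.getElem_range', List.getElem_drop, one_mul]
    rw [getD_in_range ls (start + i) (by simp at h1; omega)]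
    exact Int.add_comm _ _

lemma altGo_eq_R : ∀ (k : Nat) (ls : List Int) (start : Nat) (acc : Int), start ≤ ls.length →
    altGo ls ls.length (k + 1) start acc = R acc (ls.drop start) (k + 1) := by
  intro k
  induction k with
  | zero =>
    intro ls start acc _
    rw [altGo, if_pos rfl]
    exact range'_map_getD ls start acc
  | succ k ihk =>
    intro ls start acc hs
    have aux : ∀ (m start : Nat) (acc : Int), ls.length - (k + 1) - start = m →
        start ≤ ls.length →
        altGo ls ls.length (k + 1 + 1) start acc = R acc (ls.drop start) (k + 1 + 1) := by
      intro m
      induction m with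
      | zero =>
        intro start acc hm hstart
        rw [altGo, if_neg (by omega)]
        show ((List.range' start (ls.length - (k + 1) - start)).map _).flatten = _
        rw [hm]
        rw [R_short _ _ _ (by simp; omega)]
        rfl
      | succ m ihm =>
        intro start acc hm hstart
        have hsn : start < ls.length := by omega
        rw [altGo, if_neg (by omega)]
        show ((List.range' start (ls.length - (k + 1) - start)).map
          (fun j => altGo ls ls.length (k + 1) (j + 1) (acc + ls.getD j 0))).flatten = _
        rw [hm, List.range'_succ, List.map_cons, List.flatten_cons]
        have h2 := ihm (start + 1) acc (by omega) (by omega)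
        rw [altGo, if_neg (by omega)] at h2
        rw [show ls.length - (k + 1) - (start + 1) = m by omega] at h2
        rw [h2, ihk ls (start + 1) _ (by omega)]
        rw [List.drop_eq_getElem_cons hsn]
        simp only [R]
        rw [if_pos (by simp; omega), getD_in_range ls start hsn]
    exact aux (ls.length - (k + 1) - start) start acc rfl hs

lemma alt_eq_R (sum : Int) (ls : List Int) (level : Int) :
    recurse_alt sum ls level = if 1 ≤ level then R sum ls level.toNat else [] := by
  unfold recurse_alt
  by_cases h : level ≤ 0
  · rw [if_pos h, if_neg (by omega)]
  · rw [if_neg h, if_pos (by omega)]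
    obtain ⟨k, hk⟩ : ∃ k, level.toNat = k + 1 := ⟨level.toNat - 1, by omega⟩
    rw [hk]
    simpa using altGo_eq_R k ls 0 sum (by omega)

-- ===== VERDICT (by name: the statement is the Claim_ definition above) =====
theorem recurse_spec : Claim_equal_recurse := by
  intro sum ls level _
  unfold Spec_recurse
  rw [recurse_eq_R ls.length ls le_rfl, alt_eq_R]
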